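-- pv_equiv track=rewrite | github.com/madebagus/bot | binance_bot/routers/bot_trading_binance.py | score_trends
-- ===== SOURCE A (Python) =====
-- def score_trends(trends):
--     """Score the trends"""
--     score = 0
--     for trend in trends:
--         if trend == 'long':
--             score += 1
--         elif trend == 'short':
--             score -= 1
--     return score
-- ===== SOURCE B (Python) =====
-- def score_trends(trends):
--     """Score the trends"""
--     return _score_seg(trends, 0, len(trends))
--
-- def _score_seg(trends, lo, hi):
--     """Divide-and-conquer: score of the segment trends[lo:hi]."""
--     if lo >= hi:
--         return 0
--     if hi - lo == 1:
--         t = trends[lo]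
--         return 1 if t == 'long' else (-1 if t == 'short' else 0)
--     mid = (lo + hi) // 2
--     return _score_seg(trends, lo, mid) + _score_seg(trends, mid, hi)
-- ===== Notes on version B (the rewrite author's own statement) =====
-- stated objective: alternative
-- what changed: Replaces the left-to-right branching accumulator with a divide-and-conquer recursion that splits the index range in half and sums the two segment scores, exploiting that the score is additive over concatenation.
import Mathlib
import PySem

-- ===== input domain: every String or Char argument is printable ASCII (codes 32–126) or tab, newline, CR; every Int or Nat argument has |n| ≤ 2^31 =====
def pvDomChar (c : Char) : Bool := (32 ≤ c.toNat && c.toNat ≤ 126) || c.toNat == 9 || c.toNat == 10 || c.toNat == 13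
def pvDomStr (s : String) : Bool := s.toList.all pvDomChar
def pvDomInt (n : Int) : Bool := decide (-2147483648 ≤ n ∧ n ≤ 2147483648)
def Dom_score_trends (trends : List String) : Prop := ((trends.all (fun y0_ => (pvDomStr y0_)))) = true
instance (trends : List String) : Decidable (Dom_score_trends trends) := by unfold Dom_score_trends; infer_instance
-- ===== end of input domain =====

-- B scores via divide-and-conquer over index ranges (score is additive over concatenation) instead of A's left-to-right branching accumulator.


-- ===== PORT A =====
def score_trends (trends : List String) : Int :=
  trends.foldl (fun score trend =>
    if trend == "long" then score + 1
    else if trend == "short" then score - 1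
    else score) 0

-- ===== PORT B =====
-- _score_seg: divide-and-conquer score of trends[lo:hi] (the 'none' branch of the
-- index lookup is unreachable for the in-range indices the recursion produces).
def score_trends_seg (trends : List String) (lo hi : Int) : Int :=
  if lo ≥ hi then 0
  else if hi - lo = 1 then
    match PySem.List.pyGet? trends lo with
    | some t => if t == "long" then 1 else if t == "short" then -1 else 0
    | none => 0
  else
    let mid := PySem.Int.floordiv (lo + hi) 2
    score_trends_seg trends lo mid + score_trends_seg trends mid hi
termination_by (hi - lo).toNat
decreasing_by
  all_goals
    simp only [PySem.Int.floordiv_eq_ediv_of_pos (by omega : (0:Int) < 2)]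
    omega

def score_trends_alt (trends : List String) : Int :=
  score_trends_seg trends 0 trends.length

-- ===== PRECONDITION & SPEC =====
def Spec_score_trends (trends : List String) (out : Int) : Prop := out = score_trends_alt trends
instance (trends : List String) (out : Int) : Decidable (Spec_score_trends trends out) := by unfold Spec_score_trends; infer_instance

-- ===== CLAIM =====
def Claim_equal_score_trends : Prop := ∀ (trends : List String), Dom_score_trends trends → Spec_score_trends trends (score_trends trends)

-- ===== LEMMAS AND PROOFS =====
def pvVal (t : String) : Int := if t == "long" then 1 else if t == "short" then -1 else 0

theorem score_trends_foldl (trends : List String) (s : Int) :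
    trends.foldl (fun score trend =>
      if trend == "long" then score + 1
      else if trend == "short" then score - 1
      else score) s = s + (trends.map pvVal).sum := by
  induction trends generalizing s with
  | nil => simp
  | cons t ts ih =>
    simp only [List.foldl_cons, List.map_cons, List.sum_cons, ih, pvVal]
    split_ifs <;> ring

theorem score_trends_seg_eq (trends : List String) :
    ∀ n (lo hi : Int), (hi - lo).toNat = n → 0 ≤ lo → hi ≤ trends.length →
      score_trends_seg trends lo hi
        = (((trends.drop lo.toNat).take (hi - lo).toNat).map pvVal).sum := by
  intro n
  induction n using Nat.strong_induction_on with
  | _ n ih =>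
    intro lo hi hn hlo hhi
    rw [score_trends_seg]
    by_cases hge : lo ≥ hi
    · simp [hge, show (hi - lo).toNat = 0 by omega]
    · simp only [hge, if_false]
      by_cases h1 : hi - lo = 1
      · have hlt : lo.toNat < trends.length := by omega
        have hg : PySem.List.pyGet? trends lo = trends[lo.toNat]? := by
          rw [show lo = ((lo.toNat : Nat) : Int) by omega, PySem.List.pyGet?_natCast]
          simp only [Int.toNat_natCast]
        rw [if_pos h1, hg, List.getElem?_eq_getElem hlt]
        have htake : ((trends.drop lo.toNat).take (hi - lo).toNat)
            = [trends[lo.toNat]] := by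
          rw [show (hi - lo).toNat = 1 by omega]
          rw [List.take_one, List.head?_drop]
          simp [List.getElem?_eq_getElem hlt]
        rw [htake]
        simp [pvVal]
      · rw [if_neg h1]
        have h2 : (0:Int) < 2 := by omega
        set mid := PySem.Int.floordiv (lo + hi) 2 with hmid
        have hmid' : mid = (lo + hi) / 2 := by
          rw [hmid, PySem.Int.floordiv_eq_ediv_of_pos h2]
        have hb : lo < mid ∧ mid < hi := by constructor <;> omega
        rw [ih (mid - lo).toNat (by omega) lo mid rfl hlo (by omega),
            ih (hi - mid).toNat (by omega) mid hi rfl (by omega) hhi]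
        have hsplit : (trends.drop lo.toNat).take (hi - lo).toNat
            = (trends.drop lo.toNat).take (mid - lo).toNat
              ++ ((trends.drop mid.toNat).take (hi - mid).toNat) := by
          rw [show (hi - lo).toNat = (mid - lo).toNat + (hi - mid).toNat by omega,
              List.take_add, List.drop_drop,
              show lo.toNat + (mid - lo).toNat = mid.toNat by omega]
        rw [hsplit, List.map_append, List.sum_append]

-- ===== VERDICT =====
theorem score_trends_spec : Claim_equal_score_trends := by
  intro trends _
  unfold Spec_score_trends score_trends score_trends_alt
  rw [score_trends_foldl,
      score_trends_seg_eq trends ((trends.length : Int) - 0).toNat 0 (trends.length : Int) rfl le_rfl le_rfl]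
  simp
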